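-- pv_equiv track=rewrite | github.com/HeyyMrDJ/code_repo | programming/python/python_problem/app1/new_main.py | check_contents
-- ===== SOURCE A (Python) =====
-- def check_longest(long_list: list) -> str:
--     "Function to check longest word from list and return longest word"
--     longest_word = ""
--     for my_line in long_list:
--         if len(my_line) > len(longest_word):
--             longest_word = my_line
--     return longest_word
--
-- def check_repeating(repeating_list: list) -> str:
--     "Function to check for repeating characters"
--     for line in repeating_list:
--         new_list = []
--         for char in line:
--             if char in new_list:
--                 return "FOUND"
--             new_list.append(char)
--
--     return "NONE"
--
-- def format_lines(line_format: str) -> str: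
--     "Function to format lines for consistency"
--     line_format = line_format.strip()
--     line_format = line_format.lower()
--
--     return line_format
--
-- def check_contents(contents_check, contents_list):
--     "Function to open file"
--     for line in contents_check:
--         line = format_lines(line)
--         new_list = [line]
--         test = check_repeating(new_list)
--         if test == "NONE":
--             contents_list.append(line)
--
--     return check_longest(contents_list)
-- ===== SOURCE B (Python) =====
-- def check_contents(contents_check, contents_list):
--     # Different algorithm: repeated-character test by sorting the characters and
--     # scanning adjacent pairs (no membership scans), and the longest is found by a
--     # single backward pass over the mutated list with a >= tie-break, which yields
--     # the same first-of-maximal-length string as A's forward strict-> scan.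
--     def has_repeat(s):
--         t = sorted(s)
--         return any(a == b for a, b in zip(t, t[1:]))
--
--     for raw in contents_check:
--         line = raw.strip().lower()
--         if not has_repeat(line):
--             contents_list.append(line)
--     best = ""
--     for w in reversed(contents_list):
--         if len(w) >= len(best):
--             best = w
--     return best
-- ===== Notes on version B (the rewrite author's own statement) =====
-- stated objective: alternative
-- what changed: B detects repeated characters by sorting the line's characters and scanning adjacent pairs (instead of A's incremental membership-list scan), and computes the longest back-to-front (recursively over contents_check, then a reversed pass over the original contents_list) with a >=-tie-break instead of A's forward strict-> rescan of the full accumulated list.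
import Mathlib
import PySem

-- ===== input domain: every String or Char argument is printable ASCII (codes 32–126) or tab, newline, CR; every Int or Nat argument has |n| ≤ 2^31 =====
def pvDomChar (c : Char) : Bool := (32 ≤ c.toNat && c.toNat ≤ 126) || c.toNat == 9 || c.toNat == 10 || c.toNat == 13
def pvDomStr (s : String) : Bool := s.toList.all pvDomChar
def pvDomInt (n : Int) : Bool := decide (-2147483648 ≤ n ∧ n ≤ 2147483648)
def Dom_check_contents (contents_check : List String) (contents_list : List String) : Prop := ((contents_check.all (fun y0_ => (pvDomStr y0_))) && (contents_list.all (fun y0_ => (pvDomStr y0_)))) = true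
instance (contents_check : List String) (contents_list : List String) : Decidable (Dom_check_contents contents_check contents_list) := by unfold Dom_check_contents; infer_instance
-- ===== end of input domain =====

-- B replaces A's incremental membership-list repeat check by sort-then-adjacent-scan and
-- finds the longest by a single backward pass with a >= tie-break instead of A's forward
-- strict-> rescan; both Pythons append the passing lines to the caller's contents_list
-- (the equivalence proved here is about the return value).

-- ===== PORT A =====
def check_longest (long_list : List String) : String :=
  long_list.foldl
    (fun longest_word my_line =>
      if PySem.Str.len my_line > PySem.Str.len longest_word then my_line else longest_word) ""

-- inner 'for char in line' loop of check_repeating (early return "FOUND" = result true)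
def repeatScan : List Char → List Char → Bool
  | [], _ => false
  | char :: rest, new_list =>
      if new_list.contains char then true else repeatScan rest (new_list ++ [char])

def check_repeating : List String → String
  | [] => "NONE"
  | line :: rest => if repeatScan line.toList [] then "FOUND" else check_repeating rest

def format_lines (line_format : String) : String :=
  PySem.Str.lower (PySem.Str.strip line_format)

def check_contents (contents_check : List String) (contents_list : List String) : String :=
  check_longest
    (contents_check.foldl
      (fun acc l =>
        let line := format_lines l
        let new_list := [line]
        if check_repeating new_list = "NONE" then acc ++ [line] else acc)
      contents_list)

-- ===== PORT B =====
-- has_repeat: t = sorted(s); any(a == b for a, b in zip(t, t[1:]))  (t[1:] = t.drop 1)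
def has_repeat (s : String) : Bool :=
  let t := PySem.List.sorted s.toList (fun c => c) false
  (t.zip (t.drop 1)).any (fun p => p.1 == p.2)

-- filter loop ('if not has_repeat(line): contents_list.append(line)'), then
-- 'for w in reversed(contents_list): if len(w) >= len(best): best = w'
def check_contents_alt (contents_check : List String) (contents_list : List String) : String :=
  let mutated :=
    contents_check.foldl
      (fun acc raw =>
        let line := PySem.Str.lower (PySem.Str.strip raw)
        if !has_repeat line then acc ++ [line] else acc)
      contents_list
  mutated.reverse.foldl
    (fun best w => if PySem.Str.len w ≥ PySem.Str.len best then w else best) ""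

-- ===== PRECONDITION & SPEC =====
def Spec_check_contents (contents_check : List String) (contents_list : List String) (out : String) : Prop := out = check_contents_alt contents_check contents_list
instance (contents_check : List String) (contents_list : List String) (out : String) : Decidable (Spec_check_contents contents_check contents_list out) := by unfold Spec_check_contents; infer_instance

-- ===== CLAIM (what is proved, stated in full; the proofs are below) =====
def Claim_equal_check_contents : Prop := ∀ (contents_check : List String) (contents_list : List String), Dom_check_contents contents_check contents_list → Spec_check_contents contents_check contents_list (check_contents contents_check contents_list)

-- ===== LEMMAS AND PROOFS =====

-- right-combining 'longest, leftmost on ties'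
def gBest (w b : String) : String :=
  if PySem.Str.len b ≤ PySem.Str.len w then w else b

def fBest (L : List String) : String := L.foldr gBest ""

-- A's left-to-right strict-> scan from acc equals: acc if it is at least as long as the
-- right-fold's best, else that best.
lemma foldl_best_eq (L : List String) :
    ∀ acc : String,
      L.foldl (fun longest_word my_line =>
        if PySem.Str.len my_line > PySem.Str.len longest_word then my_line else longest_word) acc
      = if PySem.Str.len (fBest L) ≤ PySem.Str.len acc then acc else fBest L := by
  induction L with
  | nil => intro acc; simp [fBest, PySem.Str.len]
  | cons x L ih =>
      intro acc
      have hx : fBest (x :: L) = gBest x (fBest L) := rfl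
      simp only [List.foldl_cons, ih, hx, gBest]
      split_ifs <;> first | rfl | omega

lemma str_len_nonneg (s : String) : 0 ≤ PySem.Str.len s := by
  simp [PySem.Str.len]

lemma str_len_zero (s : String) (h : PySem.Str.len s = 0) : s = "" := by
  have : s.toList.length = 0 := by simpa [PySem.Str.len] using h
  have h2 : s.toList = [] := List.length_eq_zero_iff.mp this
  have h3 : s.toList = "".toList := by simpa using h2
  exact String.toList_inj.mp h3

lemma check_longest_eq_fBest (L : List String) : check_longest L = fBest L := by
  unfold check_longest
  rw [foldl_best_eq]
  split_ifs with h
  · have h0 : PySem.Str.len (fBest L) = 0 :=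
      le_antisymm (by simpa [PySem.Str.len] using h) (str_len_nonneg _)
    exact (str_len_zero _ h0).symm
  · rfl

-- A's repeat scan: false iff no duplicate (relative to the seen prefix)
lemma repeatScan_eq_false_iff (cs : List Char) :
    ∀ seen : List Char, seen.Nodup → (repeatScan cs seen = false ↔ (seen ++ cs).Nodup) := by
  induction cs with
  | nil => intro seen h; simp [repeatScan, h]
  | cons c cs ih =>
      intro seen h
      by_cases hc : seen.contains c = true
      · have hmem : c ∈ seen := by simpa using hc
        simp only [repeatScan, hc, if_true]
        constructor
        · intro h'; cases h'
        · intro hnd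
          rcases List.nodup_append.mp hnd with ⟨_, _, hdisj⟩
          exact (hdisj c hmem c List.mem_cons_self rfl).elim
      · have hcm : c ∉ seen := fun hm => hc (by simpa using hm)
        have hseen' : (seen ++ [c]).Nodup := by
          refine List.nodup_append.mpr ⟨h, List.nodup_singleton c, ?_⟩
          intro a ha b hb heq
          rw [List.mem_singleton.mp hb] at heq
          exact hcm (heq ▸ ha)
        have hstep : repeatScan (c :: cs) seen = repeatScan cs (seen ++ [c]) := by
          simp only [repeatScan]
          rw [if_neg hc]
        rw [hstep, ih _ hseen']
        constructor
        · intro hnd; simpa using hnd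
        · intro hnd; simpa using hnd

-- adjacent scan of a ≤-sorted list detects exactly a duplicate
lemma adj_scan_sorted (t : List Char) (hs : t.Pairwise (· ≤ ·)) :
    ((t.zip (t.drop 1)).any (fun p => p.1 == p.2) = false ↔ t.Nodup) := by
  induction t with
  | nil => simp
  | cons a t ih =>
      cases t with
      | nil => simp
      | cons b r =>
          have hs' : (b :: r).Pairwise (· ≤ ·) := hs.tail
          have hab : a ≤ b := (List.pairwise_cons.mp hs).1 b List.mem_cons_self
          have hbr : ∀ x ∈ r, b ≤ x := fun x hx => (List.pairwise_cons.mp hs').1 x hx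
          have ihp := ih hs'
          by_cases he : a = b
          · subst he
            have h1 : ((a :: a :: r).zip ((a :: a :: r).drop 1)).any (fun p => p.1 == p.2) = true := by
              simp
            have h2 : ¬ (a :: a :: r).Nodup := fun hnd =>
              (List.nodup_cons.mp hnd).1 List.mem_cons_self
            rw [h1]
            simp [h2]
          · have hlt : a < b := lt_of_le_of_ne hab he
            have hstep : ((a :: b :: r).zip ((a :: b :: r).drop 1)).any (fun p => p.1 == p.2)
                = ((a == b) || ((b :: r).zip ((b :: r).drop 1)).any (fun p => p.1 == p.2)) := by
              simp [List.zip]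
            have hane : (a == b) = false := by simpa using he
            rw [hstep, hane, Bool.false_or, ihp]
            constructor
            · intro hnd
              refine List.nodup_cons.mpr ⟨?_, hnd⟩
              intro hmem
              rcases List.mem_cons.mp hmem with h1 | h2
              · exact he h1
              · exact absurd (hbr a h2) (not_le.mpr hlt)
            · intro hnd; exact (List.nodup_cons.mp hnd).2

lemma has_repeat_iff (s : String) : has_repeat s = false ↔ s.toList.Nodup := by
  unfold has_repeat
  have hperm : (PySem.List.sorted s.toList (fun c => c) false).Perm s.toList :=
    PySem.List.sorted_perm ..
  have hpw : (PySem.List.sorted s.toList (fun c => c) false).Pairwise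
      (fun a b => (fun c => c) a ≤ (fun c => c) b) := PySem.List.sorted_pairwise ..
  rw [adj_scan_sorted _ (by simpa using hpw)]
  exact ⟨fun h => hperm.nodup_iff.mp h, fun h => hperm.nodup_iff.mpr h⟩

-- the two per-line keep tests agree
lemma keep_iff (line : String) :
    (check_repeating [line] = "NONE") ↔ has_repeat line = false := by
  rw [has_repeat_iff]
  have hscan := repeatScan_eq_false_iff line.toList [] (by simp)
  simp only [List.nil_append] at hscan
  cases hb : repeatScan line.toList [] with
  | false => simp [check_repeating, hb, hscan.mp hb]
  | true =>
      have hnnd : ¬ line.toList.Nodup := fun hnd => by simp [hscan.mpr hnd] at hb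
      simp only [check_repeating, hb, if_true]
      constructor
      · intro h; exact absurd h (by decide)
      · intro h; exact absurd h hnnd

-- the formatted lines A keeps
def keptLines (cc : List String) : List String :=
  (cc.map format_lines).filter (fun line => !has_repeat line)

lemma a_fold_eq (cc : List String) :
    ∀ acc : List String,
      cc.foldl
        (fun acc l =>
          let line := format_lines l
          let new_list := [line]
          if check_repeating new_list = "NONE" then acc ++ [line] else acc)
        acc = acc ++ keptLines cc := by
  induction cc with
  | nil => intro acc; simp [keptLines]
  | cons l cc ih =>
      intro acc
      simp only [List.foldl_cons]
      by_cases hk : check_repeating [format_lines l] = "NONE"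
      · have hk' : has_repeat (format_lines l) = false := (keep_iff _).mp hk
        rw [if_pos hk, ih]
        simp [keptLines, hk']
      · have hk' : ¬ has_repeat (format_lines l) = false := fun h => hk ((keep_iff _).mpr h)
        have hk'' : has_repeat (format_lines l) = true := by
          cases h : has_repeat (format_lines l)
          · exact absurd h hk'
          · rfl
        rw [if_neg hk, ih]
        simp [keptLines, hk'']

lemma b_fold_eq (cc : List String) :
    ∀ acc : List String,
      cc.foldl
        (fun acc raw =>
          let line := PySem.Str.lower (PySem.Str.strip raw)
          if !has_repeat line then acc ++ [line] else acc)
        acc = acc ++ keptLines cc := by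
  induction cc with
  | nil => intro acc; simp [keptLines]
  | cons raw cc ih =>
      intro acc
      simp only [List.foldl_cons]
      cases hk : has_repeat (PySem.Str.lower (PySem.Str.strip raw)) with
      | true =>
          simp only [hk, Bool.not_true, if_neg (Bool.false_ne_true)]
          rw [ih]
          simp [keptLines, format_lines, hk]
      | false =>
          simp only [hk, Bool.not_false, if_pos rfl]
          rw [ih]
          simp [keptLines, format_lines, hk]

-- B's reversed loop is the right-fold with gBest
lemma rev_loop_eq (cl : List String) (b : String) :
    cl.reverse.foldl
      (fun best w => if PySem.Str.len w ≥ PySem.Str.len best then w else best) b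
    = cl.foldr gBest b := by
  rw [List.foldl_reverse]
  congr 1

-- ===== VERDICT (by name: the statement is the Claim_ definition above) =====
theorem check_contents_spec : Claim_equal_check_contents := by
  intro cc cl _
  unfold Spec_check_contents check_contents check_contents_alt
  rw [a_fold_eq, check_longest_eq_fBest, b_fold_eq, rev_loop_eq]
  rfl
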